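-- pv_equiv track=rewrite | github.com/Athira502/FUELicenseOptmizerSimulatorversionBackend | app/routers/example_router.py | get_most_restrictive_license
-- ===== SOURCE A (Python) =====
-- LICENSE_RESTRICTIVENESS_ORDER = {
--     'GB Advanced Use': 3,
--     'GC Core Use': 2,
--     'GD Self-Service Use': 1,
--     'N/A': 0,
--     None: 0
-- }
--
-- def get_most_restrictive_license(licenses: list[str]) -> str | None:
--     """
--     Given a list of licenses, returns the most restrictive one based on a predefined order.
--     """
--     if not licenses:
--         return None
--
--     most_restrictive = None
--     max_restrictiveness_score = -1
--
--     for lic in licenses: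
--         score = LICENSE_RESTRICTIVENESS_ORDER.get(lic, 0)  # Default to 0 for unknown licenses
--         if score > max_restrictiveness_score:
--             max_restrictiveness_score = score
--             most_restrictive = lic
--     return most_restrictive
-- ===== SOURCE B (Python) =====
-- LICENSE_RESTRICTIVENESS_ORDER = {
--     'GB Advanced Use': 3,
--     'GC Core Use': 2,
--     'GD Self-Service Use': 1,
--     'N/A': 0,
--     None: 0
-- }
--
-- def get_most_restrictive_license(licenses: list[str]) -> str | None:
--     """Two-pass: compute the maximum score, then return its first holder."""
--     if not licenses:
--         return None
--     best = max(LICENSE_RESTRICTIVENESS_ORDER.get(l, 0) for l in licenses)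
--     return next(l for l in licenses if LICENSE_RESTRICTIVENESS_ORDER.get(l, 0) == best)
-- ===== Notes on version B (the rewrite author's own statement) =====
-- stated objective: alternative
-- what changed: Replaces A's single fused max-tracking loop (best-so-far element + running score) with two separate passes: first compute the maximum score, then return the first license attaining it.
import Mathlib
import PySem

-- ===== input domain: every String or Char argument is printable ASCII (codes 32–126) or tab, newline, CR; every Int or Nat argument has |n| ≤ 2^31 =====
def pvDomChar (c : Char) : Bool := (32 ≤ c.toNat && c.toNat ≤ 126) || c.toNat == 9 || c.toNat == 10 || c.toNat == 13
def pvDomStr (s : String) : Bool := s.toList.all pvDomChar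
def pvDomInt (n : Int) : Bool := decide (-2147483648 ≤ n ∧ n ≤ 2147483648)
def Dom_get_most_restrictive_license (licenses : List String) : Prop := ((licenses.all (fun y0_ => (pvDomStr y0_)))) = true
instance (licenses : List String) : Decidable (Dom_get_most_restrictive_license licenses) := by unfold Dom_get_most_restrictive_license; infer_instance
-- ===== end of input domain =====

-- B replaces A's fused max-tracking loop with two passes (compute max score, then find its first holder); same cost, proved equal on all inputs.


-- ===== PORT A =====
-- LICENSE_RESTRICTIVENESS_ORDER; the Python dict's `None` key is unreachable here since the inputs are strings.
def pvOrder : PySem.Dict String Int :=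
  PySem.Dict.ofList [("GB Advanced Use", 3), ("GC Core Use", 2), ("GD Self-Service Use", 1), ("N/A", 0)]

-- LICENSE_RESTRICTIVENESS_ORDER.get(lic, 0)
def pvScore (lic : String) : Int := pvOrder.getD lic 0

-- one iteration of A's loop body
def pvStepA (st : Option String × Int) (lic : String) : Option String × Int :=
  let score := pvScore lic
  if score > st.2 then (some lic, score) else st

def get_most_restrictive_license (licenses : List String) : Option String :=
  if licenses = [] then none
  else (licenses.foldl pvStepA (none, -1)).1

-- ===== PORT B =====
def get_most_restrictive_license_alt (licenses : List String) : Option String :=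
  match licenses with
  | [] => none
  | x :: xs =>
    let best := xs.foldl (fun m l => max m (pvScore l)) (pvScore x)
    (x :: xs).find? (fun l => pvScore l == best)

-- ===== PRECONDITION & SPEC =====
def Spec_get_most_restrictive_license (licenses : List String) (out : Option String) : Prop := out = get_most_restrictive_license_alt licenses
instance (licenses : List String) (out : Option String) : Decidable (Spec_get_most_restrictive_license licenses out) := by unfold Spec_get_most_restrictive_license; infer_instance

-- ===== CLAIM (what is proved, stated in full; the proofs are below) =====
def Claim_equal_get_most_restrictive_license : Prop := ∀ (licenses : List String), Dom_get_most_restrictive_license licenses → Spec_get_most_restrictive_license licenses (get_most_restrictive_license licenses)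

-- ===== LEMMAS AND PROOFS =====

theorem pvScore_nonneg (s : String) : 0 ≤ pvScore s := by
  simp [pvScore, pvOrder, PySem.Dict.getD, PySem.Dict.ofList, PySem.Dict.get?,
    PySem.Dict.update, PySem.Dict.empty, PySem.Dict.insert, List.find?]
  cases "GB Advanced Use" == s <;> cases "GC Core Use" == s <;>
    cases "GD Self-Service Use" == s <;> cases "N/A" == s <;> simp

theorem le_foldl_max (ls : List String) : ∀ (init : Int),
    init ≤ ls.foldl (fun m l => max m (pvScore l)) init := by
  induction ls with
  | nil => intro init; simp
  | cons y ys ih =>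
    intro init
    simp only [List.foldl]
    exact le_trans (le_max_left _ _) (ih _)

-- A's loop from state (some x, pvScore x) picks the first element of x :: xs attaining the max score.
theorem loop_eq (xs : List String) : ∀ (x : String),
    (xs.foldl pvStepA (some x, pvScore x)).1
    = (x :: xs).find? (fun l => pvScore l == xs.foldl (fun m l => max m (pvScore l)) (pvScore x)) := by
  induction xs with
  | nil => intro x; simp [List.find?]
  | cons y ys ih =>
    intro x
    simp only [List.foldl]
    by_cases h : pvScore y > pvScore x
    · have hmax : max (pvScore x) (pvScore y) = pvScore y := max_eq_right (le_of_lt h)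
      have hbest : pvScore x < ys.foldl (fun m l => max m (pvScore l)) (pvScore y) :=
        lt_of_lt_of_le h (le_foldl_max ys _)
      have hstep : pvStepA (some x, pvScore x) y = (some y, pvScore y) := by
        simp [pvStepA, h]
      rw [hstep, ih y, hmax]
      symm
      rw [List.find?_cons_of_neg (by simpa using ne_of_lt hbest)]
    · have hmax : max (pvScore x) (pvScore y) = pvScore x := max_eq_left (le_of_not_gt h)
      have hstep : pvStepA (some x, pvScore x) y = (some x, pvScore x) := by
        simp [pvStepA, h]
      rw [hstep, ih x, hmax]
      set best := ys.foldl (fun m l => max m (pvScore l)) (pvScore x) with hbest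
      by_cases hx : pvScore x = best
      · rw [List.find?_cons_of_pos (by simpa using hx),
          List.find?_cons_of_pos (by simpa using hx)]
      · have hy : pvScore y ≠ best := by
          intro hyb
          have h1 : pvScore y ≤ pvScore x := le_of_not_gt h
          have h2 : pvScore x ≤ best := le_foldl_max ys _
          exact hx (le_antisymm h2 (hyb ▸ h1))
        rw [List.find?_cons_of_neg (by simpa using hx),
          List.find?_cons_of_neg (by simpa using hx),
          List.find?_cons_of_neg (by simpa using hy)]

-- ===== VERDICT (by name: the statement is the Claim_ definition above) =====
theorem get_most_restrictive_license_spec : Claim_equal_get_most_restrictive_license := by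
  intro licenses _
  unfold Spec_get_most_restrictive_license
  cases licenses with
  | nil => rfl
  | cons x xs =>
    unfold get_most_restrictive_license get_most_restrictive_license_alt
    simp only [if_neg (List.cons_ne_nil x xs), List.foldl]
    have h0 : pvScore x > (-1 : Int) := lt_of_lt_of_le (by norm_num) (pvScore_nonneg x)
    have hstep : pvStepA (none, -1) x = (some x, pvScore x) := by
      simp [pvStepA, h0]
    rw [hstep]
    exact loop_eq xs x
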